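-- pv_equiv track=rewrite | github.com/venopyX/alx-frontend-for-fun | markdown2html.py | parse_ordered_list
-- ===== SOURCE A (Python) =====
-- def parse_ordered_list(content):
--     """
--     Parses markdown ordered lists and converts them to HTML.
--     """
--     lines = content.split('\n')
--     html_lines = []
--     in_list = False
--     for line in lines:
--         if line.startswith('* '):
--             if not in_list:
--                 html_lines.append('<ol>')
--                 in_list = True
--             html_lines.append(f"<li>{line[1:].strip()}</li>")
--         else:
--             if in_list:
--                 html_lines.append('</ol>')
--                 in_list = False
--             html_lines.append(line)
--     if in_list:
--         html_lines.append('</ol>')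
--     return '\n'.join(html_lines)
-- ===== SOURCE B (Python) =====
-- from itertools import groupby
--
--
-- def parse_ordered_list(content):
--     """
--     Parses markdown ordered lists and converts them to HTML.
--     (groupby-based: one <ol>...</ol> per maximal run of '* ' lines)
--     """
--     html_lines = []
--     for is_list, group in groupby(content.split('\n'),
--                                   key=lambda l: l.startswith('* ')):
--         if is_list:
--             html_lines.append('<ol>')
--             html_lines.extend(f"<li>{line[1:].strip()}</li>" for line in group)
--             html_lines.append('</ol>')
--         else:
--             html_lines.extend(group)
--     return '\n'.join(html_lines)
-- ===== Notes on version B (the rewrite author's own statement) =====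
-- stated objective: alternative
-- what changed: Replaces A's in_list-flag single pass with an itertools.groupby pass: lines are grouped by whether they are list-item lines, each True group is emitted as one <ol>...</ol> block, and False groups pass through unchanged.
import Mathlib
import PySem

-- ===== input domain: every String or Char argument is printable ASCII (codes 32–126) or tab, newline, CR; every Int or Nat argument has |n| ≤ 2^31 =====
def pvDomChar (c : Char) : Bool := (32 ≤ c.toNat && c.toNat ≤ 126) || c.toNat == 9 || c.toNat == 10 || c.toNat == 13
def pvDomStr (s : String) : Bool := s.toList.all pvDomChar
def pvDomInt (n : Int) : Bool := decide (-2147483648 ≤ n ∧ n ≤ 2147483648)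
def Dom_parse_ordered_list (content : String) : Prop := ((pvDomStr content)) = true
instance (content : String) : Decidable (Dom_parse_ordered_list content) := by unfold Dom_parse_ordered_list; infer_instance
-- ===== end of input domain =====

-- B replaces A's in_list-flag single pass by a groupby-style pass: group consecutive
-- lines by startswith('* ') and emit one <ol>…</ol> block per True group (objective: alternative decomposition).

-- content.split('\n') — sep is the non-empty literal '\n', so Python never raises; Chars.splitOn is exact here
def pogSplitLines (content : String) : List String :=
  (PySem.Chars.splitOn content.toList "\n".toList).map String.ofList

-- line.startswith('* ')  (the test both versions make)
def pogKey (l : String) : Bool := PySem.Str.startswith l "* "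

-- f"<li>{line[1:].strip()}</li>"
def pogLi (l : String) : String :=
  "<li>" ++ PySem.Str.strip (PySem.Str.slice l (some 1) none) ++ "</li>"

-- ===== PORT A =====
-- the body of A's for-loop: state = (html_lines, in_list)
def pogStepA (st : List String × Bool) (line : String) : List String × Bool :=
  if pogKey line then
    let st1 := if !st.2 then (st.1 ++ ["<ol>"], true) else st
    (st1.1 ++ [pogLi line], true)
  else
    let st1 := if st.2 then (st.1 ++ ["</ol>"], false) else st
    (st1.1 ++ [line], false)

-- the final 'if in_list: html_lines.append("</ol>")'
def pogFlushA (res : List String × Bool) : List String :=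
  if res.2 then res.1 ++ ["</ol>"] else res.1

def parse_ordered_list (content : String) : String :=
  PySem.Str.join "\n" (pogFlushA ((pogSplitLines content).foldl pogStepA ([], false)))

-- ===== PORT B =====
-- itertools.groupby: maximal runs of consecutive lines with equal key, via span
def pogGroups (lines : List String) : List (Bool × List String) :=
  match lines with
  | [] => []
  | l :: ls =>
    (pogKey l, l :: (ls.span (fun x => pogKey x == pogKey l)).1)
      :: pogGroups (ls.span (fun x => pogKey x == pogKey l)).2
termination_by lines.length
decreasing_by
  simp only [List.span_eq_takeWhile_dropWhile, List.length_cons]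
  exact Nat.lt_succ_of_le (List.length_dropWhile_le ..)

-- a True group becomes '<ol>', its <li> lines, '</ol>'; a False group passes through
def pogEmit (g : Bool × List String) : List String :=
  if g.1 then "<ol>" :: g.2.map pogLi ++ ["</ol>"] else g.2

def parse_ordered_list_alt (content : String) : String :=
  PySem.Str.join "\n" ((pogGroups (pogSplitLines content)).flatMap pogEmit)

-- ===== PRECONDITION & SPEC =====
def Spec_parse_ordered_list (content : String) (out : String) : Prop := out = parse_ordered_list_alt content
instance (content : String) (out : String) : Decidable (Spec_parse_ordered_list content out) := by unfold Spec_parse_ordered_list; infer_instance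

-- ===== CLAIM (what is proved, stated in full; the proofs are below) =====
def Claim_equal_parse_ordered_list : Prop := ∀ (content : String), Dom_parse_ordered_list content → Spec_parse_ordered_list content (parse_ordered_list content)

-- ===== LEMMAS AND PROOFS =====

-- A's loop as a structural recursion on the line list, carrying only the in_list flag
def emitA : List String → Bool → List String
  | [], b => if b then ["</ol>"] else []
  | l :: ls, b =>
    if pogKey l then
      (if b then [] else ["<ol>"]) ++ pogLi l :: emitA ls true
    else
      (if b then ["</ol>"] else []) ++ l :: emitA ls false

-- A's foldl (with its final flush) computes emitA
lemma foldl_emitA (ls : List String) (acc : List String) (b : Bool) :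
    pogFlushA (ls.foldl pogStepA (acc, b)) = acc ++ emitA ls b := by
  induction ls generalizing acc b with
  | nil => cases b <;> simp [emitA, pogFlushA]
  | cons l ls ih =>
    by_cases h : pogKey l = true <;>
      cases b <;>
        simp [pogStepA, emitA, h, ih, List.append_assoc]

-- a run of '* ' lines inside a list just emits its <li>s
lemma emitA_run_true (run rest : List String) (h : ∀ x ∈ run, pogKey x = true) :
    emitA (run ++ rest) true = run.map pogLi ++ emitA rest true := by
  induction run with
  | nil => simp
  | cons r rs ih =>
    have hr : pogKey r = true := h r (by simp)
    simp [emitA, hr, ih (fun x hx => h x (by simp [hx]))]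

-- a run of non-list lines outside a list passes through unchanged
lemma emitA_run_false (run rest : List String) (h : ∀ x ∈ run, pogKey x = false) :
    emitA (run ++ rest) false = run ++ emitA rest false := by
  induction run with
  | nil => simp
  | cons r rs ih =>
    have hr : pogKey r = false := h r (by simp)
    simp [emitA, hr, ih (fun x hx => h x (by simp [hx]))]

-- leaving a list: if the next line (if any) is not a '* ' line, close the <ol>
lemma emitA_true_close (rest : List String)
    (h : ∀ x, rest.head? = some x → pogKey x = false) :
    emitA rest true = "</ol>" :: emitA rest false := by
  cases rest with
  | nil => simp [emitA]
  | cons r rs =>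
    have hr : pogKey r = false := h r rfl
    simp [emitA, hr]

-- main: A's flag-based pass equals B's group-then-emit pass
lemma emitA_eq_groups (ls : List String) :
    emitA ls false = (pogGroups ls).flatMap pogEmit := by
  induction ls using pogGroups.induct with
  | case1 => simp [emitA, pogGroups]
  | case2 l ls ih =>
    rw [List.span_eq_takeWhile_dropWhile] at ih
    simp only at ih
    have hsplit : l :: ls
        = (l :: ls.takeWhile (fun x => pogKey x == pogKey l))
          ++ ls.dropWhile (fun x => pogKey x == pogKey l) := by
      simp [List.takeWhile_append_dropWhile]
    have hrun : ∀ x ∈ ls.takeWhile (fun x => pogKey x == pogKey l),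
        pogKey x = pogKey l := fun x hx => by
      simpa using List.mem_takeWhile_imp hx
    have hhead : ∀ x, (ls.dropWhile (fun x => pogKey x == pogKey l)).head? = some x →
        pogKey x ≠ pogKey l := by
      intro x hx
      have hne : ls.dropWhile (fun x => pogKey x == pogKey l) ≠ [] := by
        intro hnil; rw [hnil] at hx; simp at hx
      have hd := List.head_dropWhile_not (p := fun x => pogKey x == pogKey l)
        (l := ls) hne
      rw [List.head?_eq_some_head hne] at hx
      simp only [Option.some_inj] at hx
      subst hx
      simpa using hd
    rw [pogGroups, List.span_eq_takeWhile_dropWhile]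
    simp only [List.flatMap_cons, ← ih]
    by_cases hk : pogKey l = true
    · -- '* ' group: <ol>, its li's, </ol>
      rw [hsplit]
      have hstep : emitA ((l :: ls.takeWhile (fun x => pogKey x == pogKey l))
            ++ ls.dropWhile (fun x => pogKey x == pogKey l)) false
          = "<ol>" :: pogLi l
              :: ((ls.takeWhile (fun x => pogKey x == pogKey l)).map pogLi
                ++ emitA (ls.dropWhile (fun x => pogKey x == pogKey l)) true) := by
        rw [List.cons_append, emitA, if_pos hk]
        rw [emitA_run_true _ _ (fun x hx => by rw [hrun x hx, hk])]
        simp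
      rw [hstep, emitA_true_close _ (fun x hx => by
        have := hhead x hx; rw [hk] at this; simpa using this)]
      simp [pogEmit, hk]
    · -- plain group passes through unchanged
      have hk' : pogKey l = false := by simpa using hk
      rw [hsplit]
      rw [emitA_run_false _ _ (fun x hx => by
        rcases List.mem_cons.mp hx with rfl | hx
        · exact hk'
        · rw [hrun x hx, hk'])]
      simp [pogEmit, hk']

-- ===== VERDICT (by name: the statement is the Claim_ definition above) =====
theorem parse_ordered_list_spec : Claim_equal_parse_ordered_list := by
  intro content _
  show parse_ordered_list content = parse_ordered_list_alt content
  rw [parse_ordered_list, parse_ordered_list_alt, foldl_emitA, emitA_eq_groups]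
  simp
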